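-- pv_equiv track=rewrite | github.com/LashaGagnidze7/Ciphers | ciphers.py | encryptCaesarCipher
-- ===== SOURCE A (Python) =====
-- def encryptCaesarCipher(text, key):
--     key %= 26
--     shiftedText = ""
--     mappingDictionary = {'.': ',',
--                          ',': '.',
--                          '!': '?',
--                          '?': '!',
--                          '0': '1',
--                          '1': '0',
--                          '2': '3',
--                          '3': '2',
--                          '4': '5',
--                          '5': '4',
--                          '6': '7',
--                          '7': '6',
--                          '8': '9',
--                          '9': '8'}
--     for letter in text:
--         if letter.isupper():
--             shiftedText += chr((ord(letter) + key - 65) % 26 + 65)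
--         elif letter.islower():
--             shiftedText += chr((ord(letter) + key - 97) % 26 + 97)
--         elif letter in mappingDictionary.values():
--             shiftedText += mappingDictionary.get(letter)
--         else:
--             shiftedText += letter
--     return shiftedText
-- ===== SOURCE B (Python) =====
-- def encryptCaesarCipher(text, key):
--     key %= 26
--     U = 'ABCDEFGHIJKLMNOPQRSTUVWXYZ'
--     L = 'abcdefghijklmnopqrstuvwxyz'
--     table = dict(zip(U + L + '.,!?0123456789',
--                      U[key:] + U[:key] + L[key:] + L[:key] + ',.?!1032547698'))
--     return ''.join(table.get(c, c) for c in text)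
-- ===== Notes on version B (the rewrite author's own statement) =====
-- stated objective: idiomatic
-- what changed: Replaced the per-character branch chain (isupper/islower ord arithmetic, swap-dict membership test) by one translation dict built once per call - rotated alphabets obtained by string slicing plus the 14 swap pairs zipped together - and a single lookup pass over the text.
import Mathlib
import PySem

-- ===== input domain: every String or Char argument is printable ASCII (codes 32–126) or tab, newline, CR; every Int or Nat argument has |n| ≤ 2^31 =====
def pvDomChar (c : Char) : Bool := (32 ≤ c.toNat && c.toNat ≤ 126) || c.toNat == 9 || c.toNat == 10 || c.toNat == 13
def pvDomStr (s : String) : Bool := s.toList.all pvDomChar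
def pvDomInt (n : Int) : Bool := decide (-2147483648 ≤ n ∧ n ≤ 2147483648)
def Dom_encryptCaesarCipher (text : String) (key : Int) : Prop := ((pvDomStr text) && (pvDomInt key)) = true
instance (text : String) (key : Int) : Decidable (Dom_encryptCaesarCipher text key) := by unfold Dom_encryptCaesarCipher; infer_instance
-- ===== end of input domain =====

-- B replaces A's per-character branch chain by one translation table (rotated alphabets built
-- by slicing plus the 14 swap pairs zipped into a dict) and a single lookup pass; objective: idiomatic (measured constant-factor speedup in a timing run).


-- ===== PORT A =====
-- mappingDictionary, built by the 14 insertions of the Python literal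
def pvMappingA : PySem.Dict Char Char :=
  ((((((((((((((PySem.Dict.empty.insert '.' ',').insert ',' '.').insert '!' '?').insert '?' '!').insert
    '0' '1').insert '1' '0').insert '2' '3').insert '3' '2').insert '4' '5').insert '5' '4').insert
    '6' '7').insert '7' '6').insert '8' '9').insert '9' '8')

-- one iteration of A's loop body (the four branches, in order); the `.getD c`
-- default of Python's dict.get is unreachable: the guard checked membership in values = keys
def pvStepA (k : Int) (c : Char) : Char :=
  if PySem.Chars.isupper c then
    Char.ofNat ((PySem.Int.mod ((c.toNat : Int) + k - 65) 26 + 65).toNat)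
  else if PySem.Chars.islower c then
    Char.ofNat ((PySem.Int.mod ((c.toNat : Int) + k - 97) 26 + 97).toNat)
  else if pvMappingA.values.contains c then (pvMappingA.get? c).getD c
  else c

def encryptCaesarCipher (text : String) (key : Int) : String :=
  let k := PySem.Int.mod key 26          -- key %= 26
  String.mk (text.toList.foldl (fun acc c => acc ++ [pvStepA k c]) [])

-- ===== PORT B =====
-- U + L + '.,!?0123456789' — the zip's first argument in Source B
def pvSrc : List Char :=
  "ABCDEFGHIJKLMNOPQRSTUVWXYZ".toList ++ "abcdefghijklmnopqrstuvwxyz".toList ++ ".,!?0123456789".toList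

-- U[key:] + U[:key] + L[key:] + L[:key] + ',.?!1032547698' — the zip's second argument in Source B
def pvDst (k : Int) : List Char :=
  PySem.List.slice "ABCDEFGHIJKLMNOPQRSTUVWXYZ".toList (some k) none ++
  PySem.List.slice "ABCDEFGHIJKLMNOPQRSTUVWXYZ".toList none (some k) ++
  PySem.List.slice "abcdefghijklmnopqrstuvwxyz".toList (some k) none ++
  PySem.List.slice "abcdefghijklmnopqrstuvwxyz".toList none (some k) ++
  ",.?!1032547698".toList

-- dict(zip(src, dst)): maketrans-style translation table
def pvTableB (k : Int) : PySem.Dict Char Char :=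
  (pvSrc.zip (pvDst k)).foldl (fun d p => d.insert p.1 p.2) PySem.Dict.empty

def encryptCaesarCipher_alt (text : String) (key : Int) : String :=
  let k := PySem.Int.mod key 26          -- key %= 26
  let t := pvTableB k
  String.mk (text.toList.map (fun c => t.getD c c))   -- ''.join(table.get(c, c) for c in text)

-- ===== PRECONDITION & SPEC =====
def Spec_encryptCaesarCipher (text : String) (key : Int) (out : String) : Prop := out = encryptCaesarCipher_alt text key
instance (text : String) (key : Int) (out : String) : Decidable (Spec_encryptCaesarCipher text key out) := by unfold Spec_encryptCaesarCipher; infer_instance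

-- ===== CLAIM (what is proved, stated in full; the proofs are below) =====
def Claim_equal_encryptCaesarCipher : Prop := ∀ (text : String) (key : Int), Dom_encryptCaesarCipher text key → Spec_encryptCaesarCipher text key (encryptCaesarCipher text key)

-- ===== LEMMAS AND PROOFS =====

-- A's append-fold is a map
theorem pvFoldl_append_map {α β : Type} (f : α → β) (l : List α) (acc : List β) :
    l.foldl (fun a c => a ++ [f c]) acc = acc ++ l.map f := by
  induction l generalizing acc with
  | nil => simp
  | cons x xs ih => simp [List.foldl, ih, List.append_assoc]

-- a Dict IS its association list: get? is List.lookup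
theorem pvGet?_eq_lookup (l : List (Char × Char)) (x : Char) :
    (PySem.Dict.mk l).get? x = l.lookup x := by
  induction l with
  | nil => rfl
  | cons p tl ih =>
    obtain ⟨a, b⟩ := p
    rw [PySem.Dict.get?_mk_cons, List.lookup]
    by_cases h : a = x
    · simp [h]
    · have h1 : (a == x) = false := by simp [h]
      have h2 : (x == a) = false := beq_eq_false_iff_ne.mpr (fun hh => h hh.symm)
      rw [h1, h2]
      simpa using ih

theorem pvGetD_eq_lookup (d : PySem.Dict Char Char) (c dflt : Char) :
    d.getD c dflt = (d.items.lookup c).getD dflt := by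
  obtain ⟨l⟩ := d
  rw [PySem.Dict.getD_eq_get?_getD, pvGet?_eq_lookup]

theorem pvLen_dst (k : Int) (h0 : 0 ≤ k) (h1 : k ≤ 26) : (pvDst k).length = 66 := by
  unfold pvDst
  rw [PySem.List.slice_from _ h0, PySem.List.slice_to _ h0,
      PySem.List.slice_from _ h0, PySem.List.slice_to _ h0]
  simp
  omega

-- building the dict from zipped distinct fresh keys appends exactly the zipped pairs
theorem pvItems_tableB (k : Int) (h0 : 0 ≤ k) (h1 : k ≤ 26) :
    (pvTableB k).items = pvSrc.zip (pvDst k) := by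
  have hlen : pvSrc.length ≤ (pvDst k).length := by rw [pvLen_dst k h0 h1]; decide
  have hnd : ((pvSrc.zip (pvDst k)).map Prod.fst).Nodup := by
    rw [List.map_fst_zip hlen]; decide
  unfold pvTableB
  rw [PySem.Dict.items_foldl_insert_fresh _ Prod.fst Prod.snd _
        (fun a _ => PySem.Dict.contains_empty _) hnd]
  simp [PySem.Dict.empty]

-- per-character agreement, checked over the (finite) char domain and all 26 key residues
set_option maxRecDepth 10000 in
set_option maxHeartbeats 2000000 in
theorem pvStep_eq : ∀ kn : Nat, kn < 26 → ∀ cn : Nat, cn < 127 → pvDomChar (Char.ofNat cn) = true →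
    pvStepA (kn : Int) (Char.ofNat cn) =
      ((pvSrc.zip (pvDst (kn : Int))).lookup (Char.ofNat cn)).getD (Char.ofNat cn) := by
  decide

theorem pvMod26_bounds (key : Int) : 0 ≤ PySem.Int.mod key 26 ∧ PySem.Int.mod key 26 < 26 :=
  ⟨PySem.Int.mod_nonneg key (by norm_num), PySem.Int.mod_lt key (by norm_num)⟩

-- ===== VERDICT (by name: the statement is the Claim_ definition above) =====
theorem encryptCaesarCipher_spec : Claim_equal_encryptCaesarCipher := by
  intro text key hdom
  unfold Spec_encryptCaesarCipher encryptCaesarCipher encryptCaesarCipher_alt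
  have hbounds := pvMod26_bounds key
  set k := PySem.Int.mod key 26 with hk
  have hknat : k = ((k.toNat : Nat) : Int) := by omega
  have hkn : k.toNat < 26 := by omega
  simp only [pvFoldl_append_map, List.nil_append]
  congr 1
  apply List.map_congr_left
  intro c hc
  have hcdom : pvDomChar c = true := by
    unfold Dom_encryptCaesarCipher pvDomStr at hdom
    simp only [Bool.and_eq_true, List.all_eq_true] at hdom
    exact hdom.1 c hc
  have hcn : c.toNat < 127 := by
    unfold pvDomChar at hcdom
    simp at hcdom
    omega
  have hco : Char.ofNat c.toNat = c := Char.ofNat_toNat c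
  have hstep := pvStep_eq k.toNat hkn c.toNat hcn (by rwa [hco])
  rw [hco, ← hknat] at hstep
  rw [pvGetD_eq_lookup, pvItems_tableB k (by omega) (by omega)]
  exact hstep
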